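-- pv_equiv track=rewrite | github.com/jaw132/cryptography | decryptingMonoAlphabetic.py | wordAnalysis
-- ===== SOURCE A (Python) =====
-- def wordAnalysis(message):
--     oneWordList, threeLetFreq = [], {}
--
--     tempWord = ''
--     for i in message:
--         if i != ' ':
--             tempWord += i
--         else:
--             if len(tempWord) == 1:
--                 oneWordList += tempWord
--             elif len(tempWord) == 3 and tempWord in threeLetFreq:
--                 threeLetFreq[tempWord] += 1
--             elif len(tempWord) == 3 and tempWord not in threeLetFreq:
--                 threeLetFreq[tempWord] = 1
--             tempWord = ''
--     oneWordList = list(dict.fromkeys(oneWordList))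
--     return oneWordList, threeLetFreq
-- ===== SOURCE B (Python) =====
-- def wordAnalysis(message):
--     # split once; drop the trailing segment (A only emits a word on seeing a space)
--     words = message.split(' ')[:-1]
--     oneWordList = list(dict.fromkeys([w for w in words if len(w) == 1]))
--     threeLetFreq = {}
--     for w in words:
--         if len(w) == 3:
--             threeLetFreq[w] = threeLetFreq.get(w, 0) + 1
--     return oneWordList, threeLetFreq
-- ===== Notes on version B (the rewrite author's own statement) =====
-- stated objective: simpler
-- what changed: Replaces A's character-by-character scanner with its growing string buffer and end-of-loop dedup by one single-space split dropping the trailing segment, followed by two word-level passes (ordered dedup of one-letter words, get-based counting of three-letter words).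
import Mathlib
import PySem

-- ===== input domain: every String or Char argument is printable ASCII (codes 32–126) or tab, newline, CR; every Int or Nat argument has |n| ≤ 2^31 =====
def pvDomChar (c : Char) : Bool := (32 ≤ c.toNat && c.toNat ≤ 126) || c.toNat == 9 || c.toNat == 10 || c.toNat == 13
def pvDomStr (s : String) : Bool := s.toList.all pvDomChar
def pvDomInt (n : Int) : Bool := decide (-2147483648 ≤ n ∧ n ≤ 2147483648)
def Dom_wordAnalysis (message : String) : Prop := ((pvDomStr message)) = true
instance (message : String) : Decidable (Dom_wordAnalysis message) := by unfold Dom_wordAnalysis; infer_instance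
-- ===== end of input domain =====

-- B replaces A's character-by-character scanner (buffer + dedup at the end) by a single
-- split(' ')[:-1] tokenization followed by two word-level passes; same cost, simpler decomposition.

-- ===== PORT A =====
-- the 'else' branch of A's loop: emit tempWord (carried as List Char; Python string
-- concatenation is ported over char lists — exact)
def wordAnalysisEmit (s : List String × PySem.Dict String Int) (t : List Char) :
    List String × PySem.Dict String Int :=
  if t.length == 1 then
    -- oneWordList += tempWord  (extends with tempWord's characters, each a 1-char string)
    (s.1 ++ t.map (fun c => String.ofList [c]), s.2)
  else if t.length == 3 && s.2.contains (String.ofList t) then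
    -- threeLetFreq[tempWord] += 1  (read then write back)
    (s.1, s.2.insert (String.ofList t) (s.2.getD (String.ofList t) 0 + 1))
  else if t.length == 3 && !s.2.contains (String.ofList t) then
    (s.1, s.2.insert (String.ofList t) 1)
  else s

-- the 'for i in message' loop
def wordAnalysisLoop : List Char → (List String × PySem.Dict String Int) → List Char →
    List String × PySem.Dict String Int
  | [], s, _ => s
  | c :: cs, s, t =>
    if c != ' ' then wordAnalysisLoop cs s (t ++ [c])
    else wordAnalysisLoop cs (wordAnalysisEmit s t) []

def wordAnalysis (message : String) : List String × (List (String × Int)) :=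
  let s := wordAnalysisLoop message.toList ([], PySem.Dict.empty) []
  (PySem.List.dedup s.1, s.2.items)

-- ===== PORT B =====
def wordAnalysis_alt (message : String) : List String × (List (String × Int)) :=
  -- words = message.split(' ')[:-1]   ([:-1] on a list is dropLast — exact)
  let words : List String := ((PySem.Chars.splitOn message.toList [' ']).dropLast).map
    (fun cs => String.ofList cs)
  -- oneWordList = list(dict.fromkeys([w for w in words if len(w) == 1]))
  let ones := PySem.List.dedup (words.filter (fun w => PySem.Str.len w == 1))
  -- for w in words: if len(w) == 3: threeLetFreq[w] = threeLetFreq.get(w, 0) + 1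
  let freq := words.foldl
    (fun d w => if PySem.Str.len w == 3 then d.insert w (d.getD w 0 + 1) else d)
    PySem.Dict.empty
  (ones, freq.items)

-- ===== PRECONDITION & SPEC =====
def Spec_wordAnalysis (message : String) (out : List String × (List (String × Int))) : Prop := out = wordAnalysis_alt message
instance (message : String) (out : List String × (List (String × Int))) : Decidable (Spec_wordAnalysis message out) := by unfold Spec_wordAnalysis; infer_instance

-- ===== CLAIM (what is proved, stated in full; the proofs are below) =====
def Claim_equal_wordAnalysis : Prop := ∀ (message : String), Dom_wordAnalysis message → Spec_wordAnalysis message (wordAnalysis message)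

-- ===== LEMMAS AND PROOFS =====

-- word segmentation of a char list on single spaces, with pending word t;
-- the last element is the unterminated trailing word
def pvSegs : List Char → List Char → List (List Char)
  | t, [] => [t]
  | t, c :: cs => if c = ' ' then t :: pvSegs [] cs else pvSegs (t ++ [c]) cs

theorem pvSegs_ne_nil (t cs : List Char) : pvSegs t cs ≠ [] := by
  induction cs generalizing t with
  | nil => simp [pvSegs]
  | cons c cs ih =>
    simp only [pvSegs]
    split_ifs <;> simp [ih]

theorem splitOn_go_space (fuel : ℕ) :
    ∀ (l t : List Char) (accs : List (List Char)), l.length ≤ fuel →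
      PySem.Chars.splitOn.go [' '] fuel l t.reverse accs = accs.reverse ++ pvSegs t l := by
  induction fuel with
  | zero =>
    intro l t accs h
    have hl : l = [] := by cases l <;> simp_all
    subst hl
    simp [PySem.Chars.splitOn.go, pvSegs]
  | succ fuel ih =>
    intro l t accs h
    cases l with
    | nil => simp [PySem.Chars.splitOn.go, pvSegs]
    | cons c rest =>
      simp only [List.length_cons] at h
      have h2 : rest.length ≤ fuel := by omega
      by_cases hc : c = ' '
      · subst hc
        have h1 : ([' '] : List Char).isPrefixOf (' ' :: rest) = true := by
          simp [List.isPrefixOf]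
        simp only [PySem.Chars.splitOn.go, h1, pvSegs]
        have := ih rest [] (t :: accs) h2
        simpa using this
      · have h1 : ([' '] : List Char).isPrefixOf (c :: rest) = false := by
          simp [List.isPrefixOf]; exact fun h => hc h.symm
        simp only [PySem.Chars.splitOn.go, h1, pvSegs, if_neg hc]
        have : c :: t.reverse = (t ++ [c]).reverse := by simp
        rw [this]
        exact ih rest (t ++ [c]) accs h2

theorem splitOn_space (s : List Char) :
    PySem.Chars.splitOn s [' '] = pvSegs [] s := by
  have := splitOn_go_space (s.length + 1) s [] [] (by omega)
  simpa [PySem.Chars.splitOn] using this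

-- A's char loop is the fold of its emit step over the completed words
theorem loop_eq_foldl (cs : List Char) : ∀ (t : List Char) (s : List String × PySem.Dict String Int),
    wordAnalysisLoop cs s t = ((pvSegs t cs).dropLast).foldl wordAnalysisEmit s := by
  induction cs with
  | nil => intro t s; simp [wordAnalysisLoop, pvSegs]
  | cons c cs ih =>
    intro t s
    by_cases hc : c = ' '
    · subst hc
      rw [show pvSegs t (' ' :: cs) = t :: pvSegs [] cs from by simp [pvSegs]]
      rw [List.dropLast_cons_of_ne_nil (pvSegs_ne_nil [] cs), List.foldl_cons, ← ih]
      simp [wordAnalysisLoop]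
    · have hb : (c != ' ') = true := by simp [hc]
      simp only [wordAnalysisLoop, pvSegs, if_neg hc, hb, if_pos rfl]
      exact ih (t ++ [c]) s

-- the emit fold is the pair of B's two word-level passes
theorem emitFold_eq (ws : List (List Char)) :
    ∀ (o : List String) (f : PySem.Dict String Int),
    ws.foldl wordAnalysisEmit (o, f)
      = (o ++ (ws.filter (fun t => t.length == 1)).map (fun t => String.ofList t),
         ws.foldl (fun d t => if t.length == 3 then d.insert (String.ofList t) (d.getD (String.ofList t) 0 + 1) else d) f) := by
  induction ws with
  | nil => intro o f; simp
  | cons t ws ih =>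
    intro o f
    simp only [List.foldl_cons, List.filter_cons]
    by_cases h1 : t.length = 1
    · obtain ⟨c, hc⟩ : ∃ c, t = [c] := by cases t with
        | nil => simp at h1
        | cons c r => cases r; exact ⟨c, rfl⟩; simp at h1
      subst hc
      simp [wordAnalysisEmit, ih]
    · by_cases h3 : t.length = 3
      · by_cases hin : f.contains (String.ofList t)
        · simp [wordAnalysisEmit, h1, h3, hin, ih]
        · have : f.getD (String.ofList t) 0 = 0 :=
            PySem.Dict.getD_of_not_contains f 0 (by simpa using hin)
          simp [wordAnalysisEmit, h1, h3, hin, ih, this]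
      · simp [wordAnalysisEmit, h1, h3, ih]

-- ===== VERDICT (by name: the statement is the Claim_ definition above) =====
theorem wordAnalysis_spec : Claim_equal_wordAnalysis := by
  intro message _
  unfold Spec_wordAnalysis wordAnalysis wordAnalysis_alt
  rw [loop_eq_foldl, emitFold_eq, splitOn_space]
  have h3 : ∀ n : Nat, ((n : Int) = 3) ↔ (n = 3) := fun n => by omega
  have h1b : ∀ n : Nat, (((n : Int)) == 1) = (n == 1) := fun n => by simp [Nat.cast_eq_one]
  simp [List.filter_map, List.foldl_map, ← List.map_dropLast, PySem.Str.len_eq,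
    Function.comp_def, String.length_ofList, beq_eq_beq, h3, h1b]
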